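-- pv_equiv track=rewrite | github.com/BenTibi55/Memory | game_modes.py | choix_debut_ordi
-- ===== SOURCE A (Python) =====
-- def choix_debut_ordi(grid, memoire):
--     # recherche si une paire n'aurait pas déjà été révélée au cours du jeu
--     # l'ordinateur vérifie dans sa mémoire si une valeur apparaît deux fois : si oui il sélectionne d'office ces deux cases là.
--     # si il y a deux paires, la boucle est faite de telle façon que seule la première trouvée aura ses indices retournés par la fonction.
--     pos1 = (-1, -1)            # initialisation de pos1
--     pos2 = (-1, -1)            # initialisation de pos2
--     # création d'une liste vide qui sera utilisée pour déterminer si une valeur apparaît deux fois dans la grille.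
--     listing = []
--     for i in range(len(grid)):
--         for j in range(len(grid[0])):
--             if memoire[i][j] != " ":
--                 # remplissage de la liste avec les cases déjà apparues au cours du jeu.
--                 listing.append(memoire[i][j])
--     for k in range(0, len(listing)):
--         # compteur donne le nombre de fois que la valeur apparaît dans la liste
--         compteur = listing.count(listing[k])
--         # si une valeur apparaît deux fois (présence d'une paire dans la mémoire).
--         if compteur == 2:
--             # on parcours la grille pour retrouver la position des deux cases
--             for i in range(len(grid)):
--                 for j in range(len(grid[0])):
--                     if memoire[i][j] == listing[k] and compteur == 2:
--                         # on stocke les coordonnées de la première case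
--                         pos1 = (i, j)
--                         # afin de ne pas repasser dans le if mais bien aller dans le elif ensuite
--                         compteur = compteur-1
--                     elif memoire[i][j] == listing[k] and compteur == 1:
--                         # on stocke les coordonnées de la deuxième case
--                         pos2 = (i, j)
--                         # retourne directe pour éviter les conflits avec une éventuelle deuxièeme paire
--                         return (pos1, pos2)
--     # si aucune paire n'est trouvée, on renvoie (-1,-1) pour pos1 et pos2
--     return (pos1, pos2)
-- ===== SOURCE B (Python) =====
-- def choix_debut_ordi(grid, memoire):
--     # group the revealed cells by value in one row-major pass, then pick the
--     # first value (in order of first appearance) that occurs exactly twice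
--     groups = {}
--     for i in range(len(grid)):
--         for j in range(len(grid[0])):
--             v = memoire[i][j]
--             if v != " ":
--                 groups.setdefault(v, []).append((i, j))
--     for positions in groups.values():
--         if len(positions) == 2:
--             return (positions[0], positions[1])
--     return ((-1, -1), (-1, -1))
-- ===== Notes on version B (the rewrite author's own statement) =====
-- stated objective: faster
-- what changed: A builds a flat list of revealed values, then for each index recounts the whole list and re-scans the entire grid with a countdown to recover the two positions; B makes one grouping pass that maps each value to its list of positions and returns the first group (in first-appearance order) of size exactly 2, eliminating the per-index recount and the second full-grid scan.
import Mathlib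
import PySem

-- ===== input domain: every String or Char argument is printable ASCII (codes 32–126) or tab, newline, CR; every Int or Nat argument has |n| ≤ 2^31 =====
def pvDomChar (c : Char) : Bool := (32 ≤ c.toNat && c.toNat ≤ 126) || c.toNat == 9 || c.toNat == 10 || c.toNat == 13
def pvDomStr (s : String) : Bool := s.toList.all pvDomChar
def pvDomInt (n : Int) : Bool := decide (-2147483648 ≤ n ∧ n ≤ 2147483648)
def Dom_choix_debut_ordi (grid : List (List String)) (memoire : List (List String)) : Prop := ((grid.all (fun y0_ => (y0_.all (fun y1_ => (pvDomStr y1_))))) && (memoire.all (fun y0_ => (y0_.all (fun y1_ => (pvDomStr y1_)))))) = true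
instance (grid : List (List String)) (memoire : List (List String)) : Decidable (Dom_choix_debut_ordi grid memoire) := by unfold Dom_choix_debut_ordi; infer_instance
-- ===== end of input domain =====

-- B replaces A's recount-per-index plus second full-grid scan by one grouping pass (value -> positions) and a scan of the groups; objective: simpler.

-- shared cell access: memoire[i][j] (in range under Pre_)
def pvCell (memoire : List (List String)) (i j : Int) : String :=
  PySem.List.pyGetD (PySem.List.pyGetD memoire i []) j ""

-- ===== PORT A =====
-- inner 'for j in range(len(grid[0]))' of A's position-recovery scan; .error = early return
def aScanRow (memoire : List (List String)) (v : String) (i : Int)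
    (pos1 pos2 : Int × Int) (compteur : Int) :
    List Int → Except ((Int × Int) × (Int × Int)) ((Int × Int) × (Int × Int) × Int)
  | [] => .ok (pos1, pos2, compteur)
  | j :: js =>
    if pvCell memoire i j == v && compteur == 2 then
      aScanRow memoire v i (i, j) pos2 (compteur - 1) js
    else if pvCell memoire i j == v && compteur == 1 then
      .error (pos1, (i, j))
    else
      aScanRow memoire v i pos1 pos2 compteur js

-- outer 'for i in range(len(grid))' of A's position-recovery scan
def aScan (memoire : List (List String)) (v : String) (cols : List Int)
    (pos1 pos2 : Int × Int) (compteur : Int) :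
    List Int → Except ((Int × Int) × (Int × Int)) ((Int × Int) × (Int × Int) × Int)
  | [] => .ok (pos1, pos2, compteur)
  | i :: is =>
    match aScanRow memoire v i pos1 pos2 compteur cols with
    | .error r => .error r
    | .ok (p1, p2, c) => aScan memoire v cols p1 p2 c is

-- 'for k in range(0, len(listing))'
def aLoopK (memoire : List (List String)) (rows cols : List Int) (listing : List String)
    (pos1 pos2 : Int × Int) : List Int → (Int × Int) × (Int × Int)
  | [] => (pos1, pos2)
  | k :: ks =>
    let v := PySem.List.pyGetD listing k ""
    let compteur : Int := (listing.count v : Int)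
    if compteur == 2 then
      match aScan memoire v cols pos1 pos2 compteur rows with
      | .error r => r
      | .ok (p1, p2, _) => aLoopK memoire rows cols listing p1 p2 ks
    else
      aLoopK memoire rows cols listing pos1 pos2 ks

def choix_debut_ordi (grid : List (List String)) (memoire : List (List String)) :
    (Int × Int) × (Int × Int) :=
  let rows := PySem.List.pyRange 0 (grid.length : Int) 1
  let cols := PySem.List.pyRange 0 ((PySem.List.pyGetD grid 0 []).length : Int) 1
  let listing : List String :=
    rows.foldl (fun acc i =>
      cols.foldl (fun acc j =>
        if pvCell memoire i j != " " then acc ++ [pvCell memoire i j] else acc) acc) []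
  aLoopK memoire rows cols listing (-1, -1) (-1, -1)
    (PySem.List.pyRange 0 (listing.length : Int) 1)

-- ===== PORT B =====
-- 'for positions in groups.values(): if len(positions) == 2: return ...'
def bFind : List (List (Int × Int)) → (Int × Int) × (Int × Int)
  | [] => ((-1, -1), (-1, -1))
  | ps :: rest =>
    if ps.length == 2 then
      (PySem.List.pyGetD ps 0 (-1, -1), PySem.List.pyGetD ps 1 (-1, -1))
    else bFind rest

def choix_debut_ordi_alt (grid : List (List String)) (memoire : List (List String)) :
    (Int × Int) × (Int × Int) :=
  let rows := PySem.List.pyRange 0 (grid.length : Int) 1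
  let cols := PySem.List.pyRange 0 ((PySem.List.pyGetD grid 0 []).length : Int) 1
  let groups : PySem.Dict String (List (Int × Int)) :=
    rows.foldl (fun d i =>
      cols.foldl (fun d j =>
        if pvCell memoire i j != " " then
          d.modify (pvCell memoire i j) [] (· ++ [(i, j)])
        else d) d) PySem.Dict.empty
  bFind groups.values

-- ===== PRECONDITION & SPEC =====
-- Pre_ excludes exactly the inputs where Python A raises IndexError: a nonempty grid with a
-- nonempty first row whose cell accesses memoire[i][j] go out of range.
def Pre_choix_debut_ordi (grid : List (List String)) (memoire : List (List String)) : Prop :=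
  grid = [] ∨ (grid.headD []).length = 0 ∨
    (grid.length ≤ memoire.length ∧
      ∀ row ∈ memoire.take grid.length, (grid.headD []).length ≤ row.length)
instance (grid : List (List String)) (memoire : List (List String)) :
    Decidable (Pre_choix_debut_ordi grid memoire) := by unfold Pre_choix_debut_ordi; infer_instance

def pvWitness_choix_debut_ordi : List (List String) × List (List String) :=
  ([["?", "?"], ["?", "?"]], [["a", " "], ["a", "b"]])

def Spec_choix_debut_ordi (grid : List (List String)) (memoire : List (List String))
    (out : (Int × Int) × (Int × Int)) : Prop := out = choix_debut_ordi_alt grid memoire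
instance (grid : List (List String)) (memoire : List (List String)) (out : (Int × Int) × (Int × Int)) :
    Decidable (Spec_choix_debut_ordi grid memoire out) := by unfold Spec_choix_debut_ordi; infer_instance

-- ===== CLAIM (what is proved, stated in full; the proofs are below) =====
def Claim_equal_choix_debut_ordi : Prop := ∀ (grid : List (List String)) (memoire : List (List String)), Dom_choix_debut_ordi grid memoire → Pre_choix_debut_ordi grid memoire → Spec_choix_debut_ordi grid memoire (choix_debut_ordi grid memoire)

-- ===== LEMMAS AND PROOFS =====

-- the traversal order of the two nested loops, as a flat list of (i, j)
def pvCells (is js : List Int) : List (Int × Int) :=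
  is.flatMap (fun i => js.map (fun j => (i, j)))

-- spec-side flat version of A's position-recovery scan
def linScan (memoire : List (List String)) (v : String) (pos1 pos2 : Int × Int) (compteur : Int) :
    List (Int × Int) → Except ((Int × Int) × (Int × Int)) ((Int × Int) × (Int × Int) × Int)
  | [] => .ok (pos1, pos2, compteur)
  | p :: ps =>
    if pvCell memoire p.1 p.2 == v && compteur == 2 then
      linScan memoire v p pos2 (compteur - 1) ps
    else if pvCell memoire p.1 p.2 == v && compteur == 1 then
      .error (pos1, p)
    else
      linScan memoire v pos1 pos2 compteur ps

-- spec-side version of aLoopK that walks the values themselves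
def kSpec (memoire : List (List String)) (rows cols : List Int) (vsAll : List String)
    (pos1 pos2 : Int × Int) : List String → (Int × Int) × (Int × Int)
  | [] => (pos1, pos2)
  | v :: rest =>
    if ((vsAll.count v : Int)) == 2 then
      match aScan memoire v cols pos1 pos2 ((vsAll.count v : Int)) rows with
      | .error r => r
      | .ok (p1, p2, _) => kSpec memoire rows cols vsAll p1 p2 rest
    else
      kSpec memoire rows cols vsAll pos1 pos2 rest

lemma foldl_nested {β : Type} (is js : List Int) (g : β → Int → Int → β) (a : β) :
    is.foldl (fun a i => js.foldl (fun a j => g a i j) a) a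
      = (pvCells is js).foldl (fun a p => g a p.1 p.2) a := by
  induction is generalizing a with
  | nil => rfl
  | cons i is ih => simp [pvCells, List.foldl_append, List.foldl_map] at *; rw [ih]

lemma foldl_if_filter {α β : Type} (l : List α) (p : α → Bool) (f : β → α → β) (a : β) :
    l.foldl (fun a x => if p x then f a x else a) a = (l.filter p).foldl f a := by
  induction l generalizing a with
  | nil => rfl
  | cons x xs ih => cases hx : p x <;> simp [hx, ih]

lemma find?_update {α : Type} [DecidableEq α] (p : α → Bool) :
    ∀ (xs s : List α), (PySem.Set.update s xs).find? p = (s ++ xs).find? p := by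
  intro xs
  induction xs with
  | nil => intro s; simp [PySem.Set.update]
  | cons x xs ih =>
    intro s
    rw [PySem.Set.update_cons, ih]
    by_cases hx : x ∈ s
    · rw [PySem.Set.add_of_mem hx]
      rw [List.find?_append, List.find?_append]
      cases hs : s.find? p with
      | some w => simp
      | none =>
        have hpx : p x = false := by
          simpa using List.find?_eq_none.mp hs x hx
        simp [List.find?, hpx]
    · rw [PySem.Set.add_of_not_mem hx]
      simp

lemma bFind_map {κ : Type} (g : κ → List (Int × Int)) (ks : List κ) :
    bFind (ks.map g)
      = match ks.find? (fun k => (g k).length == 2) with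
        | some k => (PySem.List.pyGetD (g k) 0 (-1, -1), PySem.List.pyGetD (g k) 1 (-1, -1))
        | none => ((-1, -1), (-1, -1)) := by
  induction ks with
  | nil => rfl
  | cons k ks ih =>
    simp only [List.map_cons, bFind, List.find?]
    cases h : (g k).length == 2 with
    | true => rfl
    | false => simpa using ih


-- the pairs (value, position) of the revealed cells, in traversal order
def pvPairs (memoire : List (List String)) (is js : List Int) : List (String × (Int × Int)) :=
  ((pvCells is js).filter (fun p => pvCell memoire p.1 p.2 != " ")).map
    (fun p => (pvCell memoire p.1 p.2, p))

-- the revealed values in traversal order (= A's `listing`)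
def pvVs (memoire : List (List String)) (is js : List Int) : List String :=
  (pvPairs memoire is js).map (·.1)

-- the positions at which value v is revealed, in traversal order
def pvMatches (memoire : List (List String)) (is js : List Int) (v : String) : List (Int × Int) :=
  ((pvPairs memoire is js).filter (fun q => q.1 == v)).map (·.2)

lemma find?_congr' {α : Type} (l : List α) (p q : α → Bool) (h : ∀ x ∈ l, p x = q x) :
    l.find? p = l.find? q := by
  induction l with
  | nil => rfl
  | cons x xs ih =>
    simp only [List.find?, h x (by simp)]
    cases hq : q x with
    | true => rfl
    | false => simpa using ih (fun y hy => h y (by simp [hy]))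

lemma listing_eq (memoire : List (List String)) (is js : List Int) :
    is.foldl (fun acc i =>
      js.foldl (fun acc j =>
        if pvCell memoire i j != " " then acc ++ [pvCell memoire i j] else acc) acc) []
      = pvVs memoire is js := by
  refine (foldl_nested is js
    (fun acc i j => if pvCell memoire i j != " " then acc ++ [pvCell memoire i j] else acc)
    []).trans ?_
  refine (PySem.List.foldl_append_if (fun p : Int × Int => pvCell memoire p.1 p.2 != " ")
    (fun p : Int × Int => pvCell memoire p.1 p.2) (pvCells is js) []).trans ?_
  simp [pvVs, pvPairs, List.map_map, Function.comp_def]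

lemma groups_eq (memoire : List (List String)) (is js : List Int) :
    is.foldl (fun d i =>
      js.foldl (fun d j =>
        if pvCell memoire i j != " " then
          d.modify (pvCell memoire i j) [] (· ++ [(i, j)])
        else d) d) (PySem.Dict.empty : PySem.Dict String (List (Int × Int)))
      = (pvPairs memoire is js).foldl (fun d q => d.modify q.1 [] (· ++ [q.2]))
          PySem.Dict.empty := by
  refine (foldl_nested is js
    (fun d i j => if pvCell memoire i j != " " then
        d.modify (pvCell memoire i j) [] (· ++ [(i, j)]) else d)
    PySem.Dict.empty).trans ?_
  refine (foldl_if_filter (pvCells is js) (fun p => pvCell memoire p.1 p.2 != " ")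
    (fun d p => d.modify (pvCell memoire p.1 p.2) [] (· ++ [p])) PySem.Dict.empty).trans ?_
  simp [pvPairs, List.foldl_map]

lemma matches_getD (memoire : List (List String)) (is js : List Int) (v : String) :
    ((pvPairs memoire is js).foldl (fun d q => d.modify q.1 [] (· ++ [q.2]))
        (PySem.Dict.empty : PySem.Dict String (List (Int × Int)))).getD v []
      = pvMatches memoire is js v := by
  rw [PySem.Dict.getD_foldl_modify_append]
  simp [pvMatches, PySem.Dict.getD_empty]

lemma count_matches (memoire : List (List String)) (is js : List Int) (v : String) :
    (pvMatches memoire is js v).length = (pvVs memoire is js).count v := by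
  simp [pvMatches, pvVs, List.count_eq_countP, List.countP_map,
    ← List.countP_eq_length_filter, Function.comp_def]

lemma vs_mem_ne (memoire : List (List String)) (is js : List Int) (v : String)
    (hv : v ∈ pvVs memoire is js) : (v != " ") = true := by
  simp only [pvVs, pvPairs, List.mem_map, List.mem_filter] at hv
  obtain ⟨q, ⟨p, hp, rfl⟩, rfl⟩ := hv
  exact hp.2

lemma matches_cells (memoire : List (List String)) (is js : List Int) (v : String)
    (hv : (v != " ") = true) :
    pvMatches memoire is js v
      = (pvCells is js).filter (fun p => pvCell memoire p.1 p.2 == v) := by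
  unfold pvMatches pvPairs
  rw [List.filter_map, List.map_map]
  have h1 : ((fun (q : String × (Int × Int)) => q.1 == v) ∘
      (fun p : Int × Int => (pvCell memoire p.1 p.2, p)))
      = fun p : Int × Int => pvCell memoire p.1 p.2 == v := rfl
  rw [h1, List.filter_filter]
  have h2 : (Prod.snd ∘ fun p : Int × Int => (pvCell memoire p.1 p.2, p)) = id := rfl
  rw [h2, List.map_id]
  apply List.filter_congr
  intro p _
  cases hc : pvCell memoire p.1 p.2 == v with
  | false => rfl
  | true =>
    have : pvCell memoire p.1 p.2 = v := eq_of_beq hc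
    simp [this, hv]

lemma aScanRow_eq (memoire : List (List String)) (v : String) (i : Int) :
    ∀ (js : List Int) (pos1 pos2 : Int × Int) (c : Int),
      aScanRow memoire v i pos1 pos2 c js
        = linScan memoire v pos1 pos2 c (js.map (fun j => (i, j))) := by
  intro js
  induction js with
  | nil => intro pos1 pos2 c; rfl
  | cons j js ih =>
    intro pos1 pos2 c
    simp only [aScanRow, List.map_cons, linScan]
    split_ifs <;> first | rfl | exact ih _ _ _

lemma linScan_append (memoire : List (List String)) (v : String) :
    ∀ (l1 l2 : List (Int × Int)) (pos1 pos2 : Int × Int) (c : Int),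
      linScan memoire v pos1 pos2 c (l1 ++ l2)
        = match linScan memoire v pos1 pos2 c l1 with
          | .error r => .error r
          | .ok (p1, p2, c') => linScan memoire v p1 p2 c' l2 := by
  intro l1
  induction l1 with
  | nil => intro l2 pos1 pos2 c; rfl
  | cons p l1 ih =>
    intro l2 pos1 pos2 c
    simp only [List.cons_append, linScan]
    split_ifs <;> first | rfl | exact ih _ _ _ _

lemma aScan_flat (memoire : List (List String)) (v : String) (js : List Int) :
    ∀ (is : List Int) (pos1 pos2 : Int × Int) (c : Int),
      aScan memoire v js pos1 pos2 c is
        = linScan memoire v pos1 pos2 c (pvCells is js) := by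
  intro is
  induction is with
  | nil => intro pos1 pos2 c; rfl
  | cons i is ih =>
    intro pos1 pos2 c
    have hc : pvCells (i :: is) js
        = (js.map (fun j => (i, j))) ++ pvCells is js := by
      simp [pvCells]
    rw [hc]
    simp only [aScan, aScanRow_eq, linScan_append]
    cases linScan memoire v pos1 pos2 c (js.map (fun j => (i, j))) with
    | error r => rfl
    | ok st => obtain ⟨p1, p2, c'⟩ := st; exact ih _ _ _

lemma linScan_one (memoire : List (List String)) (v : String) (q : Int × Int) :
    ∀ (cells : List (Int × Int)) (a b : Int × Int),
      cells.filter (fun p => pvCell memoire p.1 p.2 == v) = [q] →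
      linScan memoire v a b 1 cells = .error (a, q) := by
  intro cells
  induction cells with
  | nil => intro a b h; simp at h
  | cons p ps ih =>
    intro a b h
    rw [List.filter_cons] at h
    cases hm : pvCell memoire p.1 p.2 == v with
    | true =>
      simp [hm] at h
      simp only [linScan, hm]
      norm_num
      simp [h.1]
    | false =>
      simp [hm] at h
      simp only [linScan, hm]
      norm_num
      exact ih _ _ h

lemma linScan_two (memoire : List (List String)) (v : String) (p q : Int × Int) :
    ∀ (cells : List (Int × Int)) (a b : Int × Int),
      cells.filter (fun r => pvCell memoire r.1 r.2 == v) = [p, q] →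
      linScan memoire v a b 2 cells = .error (p, q) := by
  intro cells
  induction cells with
  | nil => intro a b h; simp at h
  | cons r rs ih =>
    intro a b h
    rw [List.filter_cons] at h
    cases hm : pvCell memoire r.1 r.2 == v with
    | true =>
      simp [hm] at h
      simp only [linScan, hm]
      norm_num
      rw [h.1]
      exact linScan_one memoire v q rs p b h.2
    | false =>
      simp [hm] at h
      simp only [linScan, hm]
      norm_num
      exact ih _ _ h

lemma scan_err (memoire : List (List String)) (rows cols : List Int) (v : String)
    (hv : (v != " ") = true) (hc : (pvVs memoire rows cols).count v = 2) :
    ∃ p q, pvMatches memoire rows cols v = [p, q] ∧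
      ∀ a b : Int × Int, aScan memoire v cols a b 2 rows = .error (p, q) := by
  have hl : (pvMatches memoire rows cols v).length = 2 := by
    rw [count_matches]; exact_mod_cast hc
  obtain ⟨p, q, hm⟩ := List.length_eq_two.mp hl
  refine ⟨p, q, hm, ?_⟩
  intro a b
  rw [aScan_flat]
  exact linScan_two memoire v p q _ a b (by rw [← matches_cells memoire rows cols v hv, hm])

lemma aLoopK_eq_kSpec (memoire : List (List String)) (rows cols : List Int)
    (vsAll : List String) :
    ∀ (suf pre : List String) (pos1 pos2 : Int × Int), pre ++ suf = vsAll →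
      aLoopK memoire rows cols vsAll pos1 pos2
          (PySem.List.pyRange (pre.length : Int) (vsAll.length : Int) 1)
        = kSpec memoire rows cols vsAll pos1 pos2 suf := by
  intro suf
  induction suf with
  | nil =>
    intro pre pos1 pos2 hpre
    have : (pre.length : Int) = (vsAll.length : Int) := by
      rw [← hpre]; simp
    rw [this, PySem.List.pyRange_one_eq_nil le_rfl]
    rfl
  | cons v rest ih =>
    intro pre pos1 pos2 hpre
    have hlt : (pre.length : Int) < (vsAll.length : Int) := by
      rw [← hpre]; push_cast [List.length_append, List.length_cons]; omega
    rw [PySem.List.pyRange_one_cons hlt]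
    have hget : PySem.List.pyGetD vsAll (pre.length : Int) "" = v := by
      rw [PySem.List.pyGetD_natCast, ← hpre]
      simp [List.getD]
    have hsucc : (pre.length : Int) + 1 = ((pre ++ [v]).length : Int) := by
      simp
    simp only [aLoopK, kSpec, hget, hsucc]
    cases hcnt : ((vsAll.count v : Int)) == 2 with
    | false => rw [if_neg (by simp)]
               exact ih (pre ++ [v]) pos1 pos2 (by simp [← hpre])
    | true =>
      rw [if_pos rfl]
      cases aScan memoire v cols pos1 pos2 (vsAll.count v : Int) rows with
      | error r => rfl
      | ok st =>
        obtain ⟨p1, p2, c'⟩ := st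
        exact ih (pre ++ [v]) p1 p2 (by simp [← hpre])

lemma kSpec_find (memoire : List (List String)) (rows cols : List Int) (vsAll : List String) :
    ∀ (suf : List String) (pos1 pos2 : Int × Int),
      (∀ v ∈ suf, vsAll.count v = 2 →
        ∃ p q, pvMatches memoire rows cols v = [p, q] ∧
          ∀ a b : Int × Int, aScan memoire v cols a b 2 rows = .error (p, q)) →
      kSpec memoire rows cols vsAll pos1 pos2 suf
        = match suf.find? (fun v => vsAll.count v == 2) with
          | some v => (PySem.List.pyGetD (pvMatches memoire rows cols v) 0 (-1, -1),
                       PySem.List.pyGetD (pvMatches memoire rows cols v) 1 (-1, -1))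
          | none => (pos1, pos2) := by
  intro suf
  induction suf with
  | nil => intro pos1 pos2 _; rfl
  | cons v rest ih =>
    intro pos1 pos2 hscan
    cases hc : vsAll.count v == 2 with
    | true =>
      have hc2 : vsAll.count v = 2 := eq_of_beq hc
      obtain ⟨p, q, hm, hsc⟩ := hscan v (by simp) hc2
      have hcint : (((vsAll.count v : Int)) == 2) = true := by
        rw [hc2]; rfl
      simp only [kSpec, hcint, if_true, List.find?, hc]
      have hcast : ((vsAll.count v : Nat) : Int) = 2 := by rw [hc2]; rfl
      rw [hcast, hsc pos1 pos2, hm]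
      rfl
    | false =>
      have hcint : (((vsAll.count v : Int)) == 2) = false := by
        have : vsAll.count v ≠ 2 := by
          intro h; rw [h] at hc; simp at hc
        simp
        omega
      simp only [kSpec, hcint, Bool.false_eq_true, if_false, List.find?, hc]
      exact ih pos1 pos2 (fun w hw => hscan w (by simp [hw]))

-- ===== VERDICT (by name: the statement is the Claim_ definition above) =====
theorem choix_debut_ordi_spec : Claim_equal_choix_debut_ordi := by
  intro grid memoire _ _
  unfold Spec_choix_debut_ordi choix_debut_ordi choix_debut_ordi_alt
  simp only []
  set rows := PySem.List.pyRange 0 (grid.length : Int) 1 with hrows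
  set cols := PySem.List.pyRange 0 ((PySem.List.pyGetD grid 0 []).length : Int) 1 with hcols
  rw [listing_eq memoire rows cols, groups_eq memoire rows cols]
  -- A side
  have hA : aLoopK memoire rows cols (pvVs memoire rows cols) (-1, -1) (-1, -1)
        (PySem.List.pyRange 0 ((pvVs memoire rows cols).length : Int) 1)
      = kSpec memoire rows cols (pvVs memoire rows cols) (-1, -1) (-1, -1)
          (pvVs memoire rows cols) := by
    have := aLoopK_eq_kSpec memoire rows cols (pvVs memoire rows cols)
      (pvVs memoire rows cols) [] (-1, -1) (-1, -1) (by simp)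
    simpa using this
  rw [hA, kSpec_find memoire rows cols (pvVs memoire rows cols) (pvVs memoire rows cols)
    (-1, -1) (-1, -1) ?hscan]
  case hscan =>
    intro v hv hc
    exact scan_err memoire rows cols v (vs_mem_ne memoire rows cols v hv) hc
  -- B side
  set d := (pvPairs memoire rows cols).foldl (fun d q => d.modify q.1 [] (· ++ [q.2]))
    (PySem.Dict.empty : PySem.Dict String (List (Int × Int))) with hd
  have hnodup : d.keys.Nodup := by
    rw [hd]
    exact PySem.Dict.nodup_keys_foldl_modify_key (pvPairs memoire rows cols)
      (Prod.fst) [] (fun d q => (· ++ [q.2])) PySem.Dict.empty PySem.Dict.nodup_keys_empty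
  have hkeys : d.keys = PySem.Set.ofList (pvVs memoire rows cols) := by
    rw [hd]
    refine (PySem.Dict.keys_foldl_modify_key (pvPairs memoire rows cols)
      (Prod.fst) [] (fun d q => (· ++ [q.2])) PySem.Dict.empty).trans ?_
    simp [PySem.Dict.keys_empty, PySem.Set.update_nil_left, pvVs]
  rw [PySem.Dict.values_eq_map_keys d hnodup []]
  rw [bFind_map (fun k => d.getD k []) d.keys]
  have hgd : ∀ k, d.getD k [] = pvMatches memoire rows cols k := by
    intro k; rw [hd]; exact matches_getD memoire rows cols k
  have hpred : d.keys.find? (fun k => (d.getD k []).length == 2)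
      = (pvVs memoire rows cols).find? (fun v => (pvVs memoire rows cols).count v == 2) := by
    rw [find?_congr' d.keys _ (fun k => (pvVs memoire rows cols).count k == 2)
      (by intro k _; rw [hgd k, count_matches])]
    rw [hkeys]
    have := find?_update (fun v => (pvVs memoire rows cols).count v == 2)
      (pvVs memoire rows cols) []
    simpa [PySem.Set.update_nil_left] using this
  rw [hpred]
  cases hf : (pvVs memoire rows cols).find? (fun v => (pvVs memoire rows cols).count v == 2) with
  | none => rfl
  | some v => simp [hgd v]
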